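-- pv_equiv track=rewrite | github.com/zhangzx-uiuc/dockerized_api_example | write_sdf.py | remove_conflict_temporal_relations
-- ===== SOURCE A (Python) =====
-- from collections import defaultdict
--
-- def remove_conflict_temporal_relations(temp_dict):
--     edges = defaultdict(list)
--     def can_reach(x, y):
--         vis.add(x)
--         for edge in edges[x]:
--             if edge == y:
--                 return True
--             else:
--                 if not edge in vis:
--                     is_reached = can_reach(edge, y)
--                     if is_reached:
--                         return True
--         return False
--
--     new_temp_dict = {evt: [] for evt in temp_dict}
--     for start, ends in temp_dict.items():
--         for end in ends:
--             vis = set()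
--             if start == end:
--                 continue
--             if (not can_reach(end, start)) and not (end in edges[start]):
--                 edges[start].append(end)
--                 new_temp_dict[start].append(end)
--     return new_temp_dict
-- ===== SOURCE B (Python) =====
-- def remove_conflict_temporal_relations(temp_dict):
--     # iterative stack-based reachability instead of recursive DFS; single edges dict,
--     # result assembled at the end by a comprehension over the original keys
--     edges = {}
--
--     def reachable(src, tgt):
--         # is tgt reachable from src by a path of at least one edge?
--         stack = [src]
--         seen = set()
--         while stack:
--             n = stack.pop()
--             if n in seen:
--                 continue
--             seen.add(n)
--             nbrs = edges.get(n, [])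
--             if tgt in nbrs:
--                 return True
--             stack.extend(nbrs)
--         return False
--
--     for start, ends in temp_dict.items():
--         for end in ends:
--             if start != end and end not in edges.get(start, []) and not reachable(end, start):
--                 edges.setdefault(start, []).append(end)
--     return {k: edges.get(k, []) for k in temp_dict}
-- ===== Notes on version B (the rewrite author's own statement) =====
-- stated objective: simpler
-- what changed: Replaces the recursive can_reach DFS (shared mutable visited set) with an explicit stack-based iterative reachability loop, keeps only one edges dict instead of edges plus new_temp_dict, and assembles the result with a final comprehension over the original keys.
import Mathlib
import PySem

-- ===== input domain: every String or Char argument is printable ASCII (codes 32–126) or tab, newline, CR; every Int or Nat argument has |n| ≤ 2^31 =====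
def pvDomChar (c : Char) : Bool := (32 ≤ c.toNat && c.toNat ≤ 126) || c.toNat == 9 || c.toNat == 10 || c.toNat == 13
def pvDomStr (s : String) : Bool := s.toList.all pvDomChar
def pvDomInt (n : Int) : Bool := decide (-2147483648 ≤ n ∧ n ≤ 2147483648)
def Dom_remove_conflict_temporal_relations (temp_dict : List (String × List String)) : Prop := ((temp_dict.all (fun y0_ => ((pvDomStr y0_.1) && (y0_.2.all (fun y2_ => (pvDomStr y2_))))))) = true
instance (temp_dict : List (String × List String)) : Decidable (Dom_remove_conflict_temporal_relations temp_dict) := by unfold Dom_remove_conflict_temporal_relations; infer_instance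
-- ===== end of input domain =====

-- B replaces A's recursive can_reach by an iterative stack-based reachability loop and keeps a
-- single edges dict, rebuilding the result by a comprehension; objective: simpler (same asymptotics).

-- ===== PORT A =====
-- A's `can_reach(x, y)`: recursive DFS over `edges` with the shared, mutated set `vis` threaded
-- through (Python mutates `vis` in place; the Lean port returns the grown set).  The Nat argument
-- is a fuel guard that only makes the recursion total; `fuelA` below always suffices, so the
-- computation is exactly Python's.  `edges[x]` on the defaultdict is ported as `getD x []`
-- (the entries the defaultdict creates on reads are empty and never observed).

/-- inner `for edge in edges[x]` loop of `can_reach`; `step` is the recursive call at one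
    fuel level lower. -/
def pvGoA (step : String → List String → Bool × List String) (y : String) :
    List String → List String → Bool × List String
  | [], vis => (false, vis)
  | e :: es, vis =>
    if e = y then (true, vis)
    else if vis.contains e then pvGoA step y es vis
    else
      match step e vis with
      | (true, v) => (true, v)
      | (false, v) => pvGoA step y es v

/-- `can_reach(x, y)` with the visited set threaded. -/
def pvDfsA (E : PySem.Dict String (List String)) (y : String) :
    Nat → String → List String → Bool × List String
  | 0 => fun _ vis => (false, vis)
  | f + 1 => fun x vis => pvGoA (pvDfsA E y f) y (E.getD x []) (PySem.Set.add vis x)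

/-- fuel that always suffices: more than the number of distinct nodes of `edges`. -/
def pvFuelA (E : PySem.Dict String (List String)) : Nat :=
  (E.keys ++ E.values.flatten).length + 2

/-- `can_reach(x, y)` called with `vis = set()`, as the outer loop does. -/
def pvCanReachA (E : PySem.Dict String (List String)) (x y : String) : Bool :=
  (pvDfsA E y (pvFuelA E) x []).1

/-- body of A's inner `for end in ends` loop; state = (edges, new_temp_dict). -/
def pvStepA (s : String)
    (st : PySem.Dict String (List String) × PySem.Dict String (List String)) (e : String) :
    PySem.Dict String (List String) × PySem.Dict String (List String) :=
  if s = e then st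
  else if !pvCanReachA st.1 e s && !((st.1.getD s []).contains e) then
    (st.1.insert s (st.1.getD s [] ++ [e]),
     st.2.insert s (st.2.getD s [] ++ [e]))
  else st

def remove_conflict_temporal_relations (temp_dict : List (String × List String)) :
    List (String × List String) :=
  let td := PySem.Dict.ofList temp_dict
  -- new_temp_dict = {evt: [] for evt in temp_dict}
  let ntd0 := td.keys.foldl (fun d k => d.insert k ([] : List String)) PySem.Dict.empty
  let res := td.items.foldl (fun st p => p.2.foldl (pvStepA p.1) st) (PySem.Dict.empty, ntd0)
  res.2.items

-- ===== PORT B =====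
-- B's `reachable(src, tgt)`: explicit worklist.  Python pops from the END of the list and
-- `extend`s; with the Lean list head as the stack top this is `nbrs.reverse ++ stack`.
-- The Nat argument is again only a fuel guard; `pvFuelB` always suffices.

def pvLoopB (E : PySem.Dict String (List String)) (tgt : String) :
    Nat → List String → List String → Bool
  | 0, _, _ => false
  | _ + 1, [], _ => false
  | f + 1, n :: stack, seen =>
    if seen.contains n then pvLoopB E tgt f stack seen
    else
      let nbrs := E.getD n []
      if nbrs.contains tgt then true
      else pvLoopB E tgt f (nbrs.reverse ++ stack) (PySem.Set.add seen n)

def pvFuelB (E : PySem.Dict String (List String)) : Nat := E.values.flatten.length + 2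

def pvCanReachB (E : PySem.Dict String (List String)) (src tgt : String) : Bool :=
  pvLoopB E tgt (pvFuelB E) [src] []

/-- body of B's inner loop; `edges.setdefault(start, []).append(end)` is the `setdefault`
    followed by the overwriting insert of the extended list. -/
def pvStepB (s : String) (E : PySem.Dict String (List String)) (e : String) :
    PySem.Dict String (List String) :=
  if decide (s ≠ e) && !((E.getD s []).contains e) && !pvCanReachB E e s then
    (E.setdefault s []).insert s (E.getD s [] ++ [e])
  else E

def remove_conflict_temporal_relations_alt (temp_dict : List (String × List String)) :
    List (String × List String) :=
  let td := PySem.Dict.ofList temp_dict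
  let edges := td.items.foldl (fun E p => p.2.foldl (pvStepB p.1) E) PySem.Dict.empty
  td.keys.map (fun k => (k, edges.getD k []))

-- ===== PRECONDITION & SPEC =====
def Spec_remove_conflict_temporal_relations (temp_dict : List (String × List String)) (out : List (String × List String)) : Prop := out = remove_conflict_temporal_relations_alt temp_dict
instance (temp_dict : List (String × List String)) (out : List (String × List String)) : Decidable (Spec_remove_conflict_temporal_relations temp_dict out) := by unfold Spec_remove_conflict_temporal_relations; infer_instance

-- ===== CLAIM (what is proved, stated in full; the proofs are below) =====
def Claim_equal_remove_conflict_temporal_relations : Prop := ∀ (temp_dict : List (String × List String)), Dom_remove_conflict_temporal_relations temp_dict → Spec_remove_conflict_temporal_relations temp_dict (remove_conflict_temporal_relations temp_dict)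

-- ===== LEMMAS AND PROOFS =====

/-- one edge of the `edges` graph. -/
def pvStep (E : PySem.Dict String (List String)) (a b : String) : Prop := b ∈ E.getD a []

/-- all nodes of the graph, as a set. -/
def pvAllN (E : PySem.Dict String (List String)) : List String :=
  PySem.Set.ofList (E.keys ++ E.values.flatten)

/-- DFS measure: unvisited nodes. -/
def pvMu (E : PySem.Dict String (List String)) (vis : List String) : Nat :=
  ((pvAllN E).filter (fun n => !vis.contains n)).length

/-- worklist measure: edges out of unseen keys. -/
def pvPsi (E : PySem.Dict String (List String)) (seen : List String) : Nat :=
  (E.items.map (fun p => if seen.contains p.1 then 0 else p.2.length)).sum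

theorem pv_succ_sub_allN (E : PySem.Dict String (List String)) (x z : String)
    (hz : z ∈ E.getD x []) : z ∈ pvAllN E := by
  unfold pvAllN
  rw [PySem.Set.mem_ofList, List.mem_append]
  right
  rcases h : E.get? x with _ | v
  · rw [PySem.Dict.getD_eq_get?_getD, h] at hz; simp at hz
  · rw [PySem.Dict.getD_eq_get?_getD, h] at hz
    have hv : (x, v) ∈ E.items := PySem.Dict.mem_items_of_get?_eq_some E h
    refine List.mem_flatten.mpr ⟨v, ?_, hz⟩
    simp only [PySem.Dict.values]
    exact List.mem_map_of_mem hv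

theorem pv_mu_mono (E : PySem.Dict String (List String)) {vis vis' : List String}
    (h : ∀ a ∈ vis, a ∈ vis') : pvMu E vis' ≤ pvMu E vis := by
  unfold pvMu
  rw [← List.countP_eq_length_filter, ← List.countP_eq_length_filter]
  refine List.countP_mono_left ?_
  intro a _ ha
  simp only [List.contains_eq_mem, Bool.not_eq_true', decide_eq_false_iff_not] at *
  exact fun hm => ha (h a hm)

theorem pv_filter_strict (l : List String) (p : String → Bool) (x : String)
    (hx : x ∈ l) (hp : p x = true) :
    (l.filter (fun n => p n && !decide (n = x))).length + 1 ≤ (l.filter p).length := by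
  induction l with
  | nil => simp at hx
  | cons a l ih =>
    by_cases hax : a = x
    · subst hax
      simp [hp]
      rw [← List.countP_eq_length_filter, ← List.countP_eq_length_filter]
      exact List.countP_mono_left (by intro b _ hb; simp at hb; exact hb.1)
    · rcases List.mem_cons.mp hx with h | h
      · exact absurd h.symm hax
      · have := ih h
        by_cases hpa : p a = true
        · simp [hpa, hax]
          omega
        · simp at hpa
          simp [hpa]
          omega

theorem pv_mu_strict (E : PySem.Dict String (List String)) {vis : List String} {x : String}
    (hx : x ∈ pvAllN E) (hnv : vis.contains x = false) :
    pvMu E (PySem.Set.add vis x) + 1 ≤ pvMu E vis := by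
  have hxv : x ∉ vis := by
    intro hx'
    rw [List.contains_eq_mem, decide_eq_true (by exact hx')] at hnv
    cases hnv
  have hadd : PySem.Set.add vis x = vis ++ [x] := PySem.Set.add_of_not_mem hxv
  unfold pvMu
  rw [List.filter_congr (l := pvAllN E)
    (q := fun n => !vis.contains n && !decide (n = x))
    (fun n _ => by rw [hadd]; simp [Bool.not_or, List.contains_eq_mem])]
  exact pv_filter_strict (pvAllN E) _ x hx (by simp [List.contains_eq_mem, hxv])

theorem pv_mu_le (E : PySem.Dict String (List String)) (vis : List String) :
    pvMu E vis ≤ (E.keys ++ E.values.flatten).length := by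
  calc pvMu E vis ≤ (pvAllN E).length := List.length_filter_le _ _
    _ ≤ (E.keys ++ E.values.flatten).length := PySem.Set.length_ofList_le _

theorem pv_closed_no_reach (E : PySem.Dict String (List String)) (tgt : String)
    (S : List String)
    (hS : ∀ v ∈ S, tgt ∉ E.getD v [] ∧ ∀ z ∈ E.getD v [], z ∈ S) :
    ∀ n ∈ S, ¬ Relation.TransGen (pvStep E) n tgt := by
  have key : ∀ a, Relation.TransGen (pvStep E) a tgt → a ∈ S → False := by
    intro a htr
    induction htr using Relation.TransGen.head_induction_on with
    | single h => exact fun ha => (hS _ ha).1 h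
    | head h _ ih => exact fun ha => ih ((hS _ ha).2 _ h)
  exact fun n hn htr => key n htr hn

-- A side
theorem pvGoA_sound (step : String → List String → Bool × List String) (y : String)
    {R : String → Prop}
    (hs : ∀ e vis v, step e vis = (true, v) → R e) :
    ∀ es vis v, pvGoA step y es vis = (true, v) → ∃ e ∈ es, e = y ∨ R e := by
  intro es
  induction es with
  | nil => intro vis v h; simp [pvGoA] at h
  | cons e es ih =>
    intro vis v h
    simp only [pvGoA] at h
    by_cases h1 : e = y
    · exact ⟨e, List.mem_cons_self, Or.inl h1⟩
    · simp only [h1, if_false] at h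
      by_cases h2 : vis.contains e
      · simp only [h2, if_true] at h
        obtain ⟨e', he', hc⟩ := ih vis v h
        exact ⟨e', List.mem_cons_of_mem _ he', hc⟩
      · simp only [h2, Bool.false_eq_true, if_false] at h
        rcases hstep : step e vis with ⟨b, v1⟩
        rw [hstep] at h
        cases b
        · obtain ⟨e', he', hc⟩ := ih v1 v h
          exact ⟨e', List.mem_cons_of_mem _ he', hc⟩
        · exact ⟨e, List.mem_cons_self, Or.inr (hs e vis v1 hstep)⟩

theorem pvDfsA_sound (E : PySem.Dict String (List String)) (y : String) :
    ∀ f x vis v, pvDfsA E y f x vis = (true, v) → Relation.TransGen (pvStep E) x y := by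
  intro f
  induction f with
  | zero => intro x vis v h; simp [pvDfsA] at h
  | succ f ih =>
    intro x vis v h
    simp only [pvDfsA] at h
    obtain ⟨e, he, hcase⟩ := pvGoA_sound (pvDfsA E y f) y
      (fun e vis v hv => ih e vis v hv) _ _ _ h
    rcases hcase with rfl | htr
    · exact Relation.TransGen.single he
    · exact Relation.TransGen.head he htr

/-- closure property of a failed DFS call. -/
def pvC (E : PySem.Dict String (List String)) (y : String) (v vis : List String) : Prop :=
  ∀ w ∈ v, w ∉ vis → y ∉ E.getD w [] ∧ ∀ z ∈ E.getD w [], z ∈ v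

theorem pvGoA_complete (E : PySem.Dict String (List String)) (y : String) (f : Nat)
    (IH : ∀ x vis v, f ≥ pvMu E (PySem.Set.add vis x) + 1 → pvDfsA E y f x vis = (false, v) →
      x ∈ v ∧ (∀ a ∈ vis, a ∈ v) ∧ pvC E y v vis) :
    ∀ es vis v, (∀ e ∈ es, e ∈ pvAllN E) → f ≥ pvMu E vis →
      pvGoA (pvDfsA E y f) y es vis = (false, v) →
      (∀ a ∈ vis, a ∈ v) ∧ (∀ e ∈ es, e ≠ y ∧ e ∈ v) ∧ pvC E y v vis := by
  intro es
  induction es with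
  | nil =>
    intro vis v _ _ h
    simp only [pvGoA, Prod.mk.injEq] at h
    rw [← h.2]
    exact ⟨fun a ha => ha, by simp, fun w hw hwv => absurd hw hwv⟩
  | cons e es ih =>
    intro vis v hes hf h
    simp only [pvGoA] at h
    by_cases h1 : e = y
    · simp [h1] at h
    · simp only [h1, if_false] at h
      by_cases h2 : vis.contains e
      · simp only [h2, if_true] at h
        obtain ⟨hsub, hkids, hC⟩ := ih vis v (fun e' he' => hes e' (List.mem_cons_of_mem _ he')) hf h
        have hev : e ∈ v := hsub e (by simpa [List.contains_eq_mem] using h2)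
        exact ⟨hsub, fun e' he' => by
          rcases List.mem_cons.mp he' with heq | hmem
          · rw [heq]; exact ⟨h1, hev⟩
          · exact hkids e' hmem, hC⟩
      · simp only [h2, Bool.false_eq_true, if_false] at h
        rcases hstep : pvDfsA E y f e vis with ⟨b, v1⟩
        rw [hstep] at h
        cases b
        · have hf1 : f ≥ pvMu E (PySem.Set.add vis e) + 1 := by
            have := pv_mu_strict E (hes e List.mem_cons_self) (by simpa using h2)
            omega
          obtain ⟨hev1, hsub1, hC1⟩ := IH e vis v1 hf1 hstep
          have hf2 : f ≥ pvMu E v1 := le_trans (pv_mu_mono E hsub1) hf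
          obtain ⟨hsub2, hkids, hC2⟩ := ih v1 v (fun e' he' => hes e' (List.mem_cons_of_mem _ he')) hf2 h
          refine ⟨fun a ha => hsub2 a (hsub1 a ha), fun e' he' => ?_, ?_⟩
          · rcases List.mem_cons.mp he' with heq | hmem
            · rw [heq]; exact ⟨h1, hsub2 e hev1⟩
            · exact hkids e' hmem
          · intro w hw hwvis
            by_cases hw1 : w ∈ v1
            · obtain ⟨hy, hz⟩ := hC1 w hw1 hwvis
              exact ⟨hy, fun z hz' => hsub2 z (hz z hz')⟩
            · exact hC2 w hw hw1
        · simp at h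

theorem pvDfsA_complete (E : PySem.Dict String (List String)) (y : String) :
    ∀ f x vis v, f ≥ pvMu E (PySem.Set.add vis x) + 1 →
      pvDfsA E y f x vis = (false, v) →
      x ∈ v ∧ (∀ a ∈ vis, a ∈ v) ∧ pvC E y v vis := by
  intro f
  induction f with
  | zero => intro x vis v hf h; omega
  | succ f ih =>
    intro x vis v hf hd
    simp only [pvDfsA] at hd
    obtain ⟨hsub, hes, hC⟩ := pvGoA_complete E y f ih _ _ _
      (fun e he => pv_succ_sub_allN E x e he) (by omega) hd
    have hx : x ∈ v := hsub x (by rw [PySem.Set.mem_add]; exact Or.inr rfl)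
    refine ⟨hx, fun a ha => hsub a (by rw [PySem.Set.mem_add]; exact Or.inl ha), ?_⟩
    intro w hw hwvis
    by_cases hwx : w = x
    · subst hwx
      exact ⟨fun hy => (hes y hy).1 rfl, fun z hz => (hes z hz).2⟩
    · refine hC w hw ?_
      rw [PySem.Set.mem_add]
      rintro (h | h)
      · exact hwvis h
      · exact hwx h

theorem pvCanReachA_iff (E : PySem.Dict String (List String)) (x y : String) :
    pvCanReachA E x y = true ↔ Relation.TransGen (pvStep E) x y := by
  unfold pvCanReachA
  rcases hd : pvDfsA E y (pvFuelA E) x [] with ⟨b, v⟩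
  cases b
  · simp only [Bool.false_eq_true, false_iff]
    have hfuel : pvFuelA E ≥ pvMu E (PySem.Set.add [] x) + 1 := by
      have := pv_mu_le E (PySem.Set.add [] x)
      unfold pvFuelA
      omega
    obtain ⟨hx, -, hC⟩ := pvDfsA_complete E y _ x [] v hfuel hd
    exact pv_closed_no_reach E y v (fun w hw => hC w hw (by simp)) x hx
  · simp only [true_iff]
    exact pvDfsA_sound E y _ x [] v hd

-- B side
theorem pvLoopB_sound (E : PySem.Dict String (List String)) (tgt : String) :
    ∀ f stack seen, pvLoopB E tgt f stack seen = true →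
      ∃ n ∈ stack, Relation.TransGen (pvStep E) n tgt := by
  intro f
  induction f with
  | zero => intro stack seen h; simp [pvLoopB] at h
  | succ f ih =>
    intro stack seen h
    match stack with
    | [] => simp [pvLoopB] at h
    | n :: stack =>
      simp only [pvLoopB] at h
      by_cases h1 : seen.contains n
      · simp only [h1, if_true] at h
        obtain ⟨m, hm, ht⟩ := ih _ _ h
        exact ⟨m, List.mem_cons_of_mem _ hm, ht⟩
      · simp only [h1, Bool.false_eq_true, if_false] at h
        by_cases h2 : (E.getD n []).contains tgt
        · exact ⟨n, List.mem_cons_self,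
            Relation.TransGen.single (by simpa [pvStep, List.contains_eq_mem] using h2)⟩
        · simp only [h2, Bool.false_eq_true, if_false] at h
          obtain ⟨m, hm, ht⟩ := ih _ _ h
          rcases List.mem_append.mp hm with hm | hm
          · exact ⟨n, List.mem_cons_self,
              Relation.TransGen.head (List.mem_reverse.mp hm) ht⟩
          · exact ⟨m, List.mem_cons_of_mem _ hm, ht⟩

theorem pv_psi_add (E : PySem.Dict String (List String)) {seen : List String} {n : String}
    (hn : seen.contains n = false) :
    (E.getD n []).length + pvPsi E (PySem.Set.add seen n) ≤ pvPsi E seen := by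
  obtain ⟨l⟩ := E
  induction l with
  | nil => simp [pvPsi, PySem.Dict.getD_eq_get?_getD, PySem.Dict.get?]
  | cons p l ih =>
    obtain ⟨k, v⟩ := p
    by_cases hk : k = n
    · subst hk
      have hgetD : (PySem.Dict.mk ((k, v) :: l)).getD k [] = v := by
        rw [PySem.Dict.getD_eq_get?_getD, PySem.Dict.get?_mk_cons]
        simp
      rw [hgetD]
      have hterm_new : (if List.contains (PySem.Set.add seen k) k = true then 0 else v.length) = 0 := by
        have : k ∈ PySem.Set.add seen k := by rw [PySem.Set.mem_add]; exact Or.inr rfl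
        simp [List.contains_eq_mem, this]
      have hterm_old : (if seen.contains k then 0 else v.length) = v.length := by
        simp only [hn, Bool.false_eq_true, if_false]
      have hrest : ((l.map (fun p => if List.contains (PySem.Set.add seen k) p.1 = true then 0 else p.2.length)).sum)
          ≤ (l.map (fun p => if seen.contains p.1 then 0 else p.2.length)).sum := by
        refine List.sum_le_sum ?_
        intro q _
        by_cases hq : seen.contains q.1
        · have : q.1 ∈ PySem.Set.add seen k := by
            rw [PySem.Set.mem_add]
            exact Or.inl (by simpa [List.contains_eq_mem] using hq)
          simp [List.contains_eq_mem, this]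
        · simp only [hq, Bool.false_eq_true, if_false]
          split <;> omega
      simp only [pvPsi, List.map_cons, List.sum_cons] at *
      simp only [hterm_new, hterm_old]
      omega
    · have hgetD : (PySem.Dict.mk ((k, v) :: l)).getD n [] = (PySem.Dict.mk l).getD n [] := by
        rw [PySem.Dict.getD_eq_get?_getD, PySem.Dict.get?_mk_cons, PySem.Dict.getD_eq_get?_getD]
        simp [hk]
      have hterm : (if List.contains (PySem.Set.add seen n) k = true then 0 else v.length)
          = (if seen.contains k then 0 else v.length) := by
        by_cases hq : k ∈ seen
        · have : k ∈ PySem.Set.add seen n := by rw [PySem.Set.mem_add]; exact Or.inl hq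
          simp [List.contains_eq_mem, hq, this]
        · have : k ∉ PySem.Set.add seen n := by
            rw [PySem.Set.mem_add]
            rintro (h | h)
            · exact hq h
            · exact hk h
          simp [List.contains_eq_mem, hq, this]
      rw [hgetD]
      simp only [pvPsi, List.map_cons, List.sum_cons] at *
      simp only [hterm]
      omega

theorem pvLoopB_complete (E : PySem.Dict String (List String)) (tgt : String) :
    ∀ f stack seen, f ≥ stack.length + pvPsi E seen + 1 →
      (∀ v ∈ seen, tgt ∉ E.getD v [] ∧ ∀ z ∈ E.getD v [], z ∈ seen ∨ z ∈ stack) →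
      pvLoopB E tgt f stack seen = false →
      ∀ m, m ∈ stack ∨ m ∈ seen → ¬ Relation.TransGen (pvStep E) m tgt := by
  intro f
  induction f with
  | zero => intro stack seen hf _ _; omega
  | succ f ih =>
    intro stack seen hf hI hfalse
    match stack with
    | [] =>
      rintro m (hm | hm)
      · simp at hm
      · exact pv_closed_no_reach E tgt seen
          (fun v hv => ⟨(hI v hv).1, fun z hz => by
            rcases (hI v hv).2 z hz with h | h
            · exact h
            · simp at h⟩) m hm
    | n :: stack =>
      simp only [pvLoopB] at hfalse
      by_cases h1 : seen.contains n
      · simp only [h1, if_true] at hfalse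
        have hn : n ∈ seen := by simpa [List.contains_eq_mem] using h1
        have := ih stack seen (by simp at hf ⊢; omega)
          (fun v hv => ⟨(hI v hv).1, fun z hz => by
            rcases (hI v hv).2 z hz with h | h
            · exact Or.inl h
            · rcases List.mem_cons.mp h with heq | h
              · exact Or.inl (heq ▸ hn)
              · exact Or.inr h⟩) hfalse
        rintro m (hm | hm)
        · rcases List.mem_cons.mp hm with heq | hm
          · exact heq ▸ this n (Or.inr hn)
          · exact this m (Or.inl hm)
        · exact this m (Or.inr hm)
      · simp only [h1, Bool.false_eq_true, if_false] at hfalse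
        by_cases h2 : (E.getD n []).contains tgt
        · rw [if_pos h2] at hfalse; cases hfalse
        · simp only [h2, Bool.false_eq_true, if_false] at hfalse
          have hpsi := pv_psi_add E (seen := seen) (n := n) (by simpa using h1)
          have hf' : f ≥ ((E.getD n []).reverse ++ stack).length
              + pvPsi E (PySem.Set.add seen n) + 1 := by
            simp only [List.length_append, List.length_reverse] at *
            simp at hf
            omega
          have hI' : ∀ v ∈ PySem.Set.add seen n, tgt ∉ E.getD v [] ∧
              ∀ z ∈ E.getD v [], z ∈ PySem.Set.add seen n ∨ z ∈ (E.getD n []).reverse ++ stack := by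
            intro v hv
            rw [PySem.Set.mem_add] at hv
            rcases hv with hv | rfl
            · refine ⟨(hI v hv).1, fun z hz => ?_⟩
              rcases (hI v hv).2 z hz with h | h
              · exact Or.inl (by rw [PySem.Set.mem_add]; exact Or.inl h)
              · rcases List.mem_cons.mp h with heq | h
                · exact Or.inl (by rw [PySem.Set.mem_add]; exact Or.inr heq)
                · exact Or.inr (List.mem_append.mpr (Or.inr h))
            · refine ⟨by simpa [List.contains_eq_mem] using h2, fun z hz => ?_⟩
              exact Or.inr (List.mem_append.mpr (Or.inl (List.mem_reverse.mpr hz)))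
          have key := ih _ _ hf' hI' hfalse
          rintro m (hm | hm)
          · rcases List.mem_cons.mp hm with heq | hm
            · exact heq ▸ key n (Or.inr (by rw [PySem.Set.mem_add]; exact Or.inr rfl))
            · exact key m (Or.inl (List.mem_append.mpr (Or.inr hm)))
          · exact key m (Or.inr (by rw [PySem.Set.mem_add]; exact Or.inl hm))

theorem pvCanReachB_iff (E : PySem.Dict String (List String)) (x y : String) :
    pvCanReachB E x y = true ↔ Relation.TransGen (pvStep E) x y := by
  unfold pvCanReachB
  rcases hb : pvLoopB E y (pvFuelB E) [x] [] with _ | _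
  · simp only [Bool.false_eq_true, false_iff]
    have hpsi : pvPsi E [] = E.values.flatten.length := by
      unfold pvPsi
      simp only [List.contains_eq_mem, List.not_mem_nil, decide_false, if_neg Bool.false_ne_true]
      rw [List.length_flatten]
      simp [PySem.Dict.values, List.map_map]
      rfl
    have hfuel : pvFuelB E ≥ ([x] : List String).length + pvPsi E [] + 1 := by
      unfold pvFuelB
      rw [hpsi, List.length_flatten]
      simp
      omega
    exact pvLoopB_complete E y _ [x] [] hfuel (by simp) hb x (Or.inl List.mem_cons_self)
  · simp only [true_iff]
    obtain ⟨n, hn, ht⟩ := pvLoopB_sound E y _ [x] [] hb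
    rcases List.mem_cons.mp hn with heq | h
    · exact heq ▸ ht
    · simp at h

theorem pvCanReach_eq (E : PySem.Dict String (List String)) (x y : String) :
    pvCanReachA E x y = pvCanReachB E x y := by
  rcases hA : pvCanReachA E x y with _ | _ <;> rcases hB : pvCanReachB E x y with _ | _
  · rfl
  · exact absurd ((pvCanReachA_iff E x y).mpr ((pvCanReachB_iff E x y).mp hB)) (by simp [hA])
  · exact absurd ((pvCanReachB_iff E x y).mpr ((pvCanReachA_iff E x y).mp hA)) (by simp [hB])
  · rfl

-- outer loop
def pvInv (ks : List String)
    (st : PySem.Dict String (List String) × PySem.Dict String (List String))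
    (E : PySem.Dict String (List String)) : Prop :=
  st.1 = E ∧ st.2.items = ks.map (fun k => (k, E.getD k []))

theorem pvStep_pres (ks : List String) (hnd : ks.Nodup) (s : String) (hs : s ∈ ks)
    (st : PySem.Dict String (List String) × PySem.Dict String (List String))
    (E : PySem.Dict String (List String)) (e : String)
    (h : pvInv ks st E) : pvInv ks (pvStepA s st e) (pvStepB s E e) := by
  obtain ⟨hE, hitems⟩ := h
  by_cases hse : s = e
  · simp only [pvStepA, pvStepB, hse]
    simp only [ne_eq, not_true_eq_false, decide_false, Bool.false_and, Bool.false_eq_true,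
      if_false, if_true]
    exact ⟨hE, hitems⟩
  · have hcond : (decide (s ≠ e) && !((E.getD s []).contains e) && !pvCanReachB E e s)
        = (!pvCanReachA st.1 e s && !((st.1.getD s []).contains e)) := by
      rw [hE, pvCanReach_eq]
      simp only [ne_eq, hse, not_false_eq_true, decide_true, Bool.true_and]
      exact Bool.and_comm _ _
    simp only [pvStepA, pvStepB, hse, if_false, hcond]
    rcases hc : (!pvCanReachA st.1 e s && !((st.1.getD s []).contains e)) with _ | _
    · simp only [Bool.false_eq_true, if_false]
      exact ⟨hE, hitems⟩
    · simp only [if_true]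
      have hd2keys : st.2.keys = ks := by
        unfold PySem.Dict.keys
        rw [hitems, List.map_map]
        exact List.map_id'' (congrFun rfl) ks
      have hd2nodup : st.2.keys.Nodup := by rw [hd2keys]; exact hnd
      have hmem : (s, E.getD s []) ∈ st.2.items := by
        rw [hitems]
        exact List.mem_map_of_mem hs
      have hgetd2 : st.2.getD s [] = E.getD s [] :=
        PySem.Dict.getD_of_mem_items st.2 hmem hd2nodup []
      have hcont : st.2.contains s = true := by
        rw [PySem.Dict.contains_iff_mem_keys, hd2keys]
        exact hs
      have hBE : (E.setdefault s []).insert s (E.getD s [] ++ [e])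
          = E.insert s (E.getD s [] ++ [e]) := by
        by_cases hcE : E.contains s
        · rw [PySem.Dict.setdefault_of_contains E [] hcE]
        · rw [PySem.Dict.setdefault_of_not_contains E [] (by simpa using hcE),
            PySem.Dict.insert_insert_self]
      constructor
      · show st.1.insert s (st.1.getD s [] ++ [e]) = _
        rw [hE, hBE]
      · rw [PySem.Dict.items_insert_of_contains st.2 _ hcont, hitems, hgetd2, hBE, List.map_map]
        refine List.map_congr_left ?_
        intro k _
        by_cases hks' : k = s
        · subst hks'
          simp [PySem.Dict.getD_insert_self]
        · simp [PySem.Dict.getD_insert, hks']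

theorem pvFold_pres (ks : List String) (hnd : ks.Nodup)
    (items : List (String × List String)) (hks : ∀ p ∈ items, p.1 ∈ ks)
    (st : PySem.Dict String (List String) × PySem.Dict String (List String))
    (E : PySem.Dict String (List String)) (h : pvInv ks st E) :
    pvInv ks (items.foldl (fun st p => p.2.foldl (pvStepA p.1) st) st)
      (items.foldl (fun E p => p.2.foldl (pvStepB p.1) E) E) := by
  induction items generalizing st E with
  | nil => exact h
  | cons p ps ih =>
    simp only [List.foldl_cons]
    refine ih (fun q hq => hks q (List.mem_cons_of_mem _ hq)) _ _ ?_
    have hp : p.1 ∈ ks := hks p List.mem_cons_self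
    clear hks ih
    induction p.2 generalizing st E with
    | nil => exact h
    | cons e es ihe =>
      simp only [List.foldl_cons]
      exact ihe _ _ (pvStep_pres ks hnd p.1 hp st E e h)

-- ===== VERDICT (by name: the statement is the Claim_ definition above) =====
theorem remove_conflict_temporal_relations_spec : Claim_equal_remove_conflict_temporal_relations := by
  intro temp_dict _
  unfold Spec_remove_conflict_temporal_relations
  unfold remove_conflict_temporal_relations remove_conflict_temporal_relations_alt
  set td := PySem.Dict.ofList temp_dict with htd
  have hnd : td.keys.Nodup := PySem.Dict.nodup_keys_ofList temp_dict
  have hinit : (td.keys.foldl (fun d k => d.insert k ([] : List String)) PySem.Dict.empty).items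
      = td.keys.map (fun k => (k, (PySem.Dict.empty : PySem.Dict String (List String)).getD k [])) := by
    have := PySem.Dict.items_foldl_insert_fresh td.keys (fun a => a) (fun _ => ([] : List String))
      PySem.Dict.empty (by intro a _; simp [PySem.Dict.contains_empty]) (by simpa using hnd)
    simpa [PySem.Dict.getD_empty] using this
  have hks : ∀ p ∈ td.items, p.1 ∈ td.keys := by
    intro p hp
    simp only [PySem.Dict.keys]
    exact List.mem_map_of_mem hp
  have hinv := pvFold_pres td.keys hnd td.items hks
    (PySem.Dict.empty, td.keys.foldl (fun d k => d.insert k ([] : List String)) PySem.Dict.empty)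
    PySem.Dict.empty ⟨rfl, hinit⟩
  exact hinv.2
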